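-- pv_equiv track=rewrite | github.com/amazon7737/algorithm-test | 2023_1_old_file/programmers/lv1/풀음/두개뽑아서더하기.py | solution
-- ===== SOURCE A (Python) =====
-- from collections import deque
--
-- def solution(numbers):
--     arr = []
--     numbers2 = deque(numbers)
--     for i in range(len(numbers2)):
--         a = numbers2.pop()
--
--         for j in range(len(numbers2)):
--             arr.append(numbers2[j]+a)
--
--         numbers2.appendleft(a)
--     return sorted(list(set(arr)))
-- ===== SOURCE B (Python) =====
-- from itertools import combinations
--
-- def solution(numbers):
--     return sorted({x + y for x, y in combinations(numbers, 2)})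
-- ===== Notes on version B (the rewrite author's own statement) =====
-- stated objective: simpler
-- what changed: Replaced the deque rotation (pop right, sum against each remaining element, appendleft), which generates every unordered pair's sum twice, with a single set-comprehension pass over itertools.combinations(numbers, 2).
import Mathlib
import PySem

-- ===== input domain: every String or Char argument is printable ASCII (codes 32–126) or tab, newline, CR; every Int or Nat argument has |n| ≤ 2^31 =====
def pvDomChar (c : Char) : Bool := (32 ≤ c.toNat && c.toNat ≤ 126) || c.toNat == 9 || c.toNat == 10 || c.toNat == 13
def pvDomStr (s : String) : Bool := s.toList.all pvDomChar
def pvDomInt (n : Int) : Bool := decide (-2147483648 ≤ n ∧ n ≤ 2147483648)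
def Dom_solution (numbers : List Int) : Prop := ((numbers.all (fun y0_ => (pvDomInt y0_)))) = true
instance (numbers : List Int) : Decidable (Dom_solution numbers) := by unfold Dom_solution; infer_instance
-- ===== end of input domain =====

-- B replaces A's deque rotation (pop right, sum against every remaining element, appendleft),
-- which generates each unordered pair's sum twice, with one pass over the i<j pairs into a set; simpler.

-- ===== PORT A =====
-- the deque loop: k iterations remain; each pops the last element a, appends (each remaining c)+a
-- to arr, and pushes a to the front.  (The none branch is unreachable: the deque never empties.)
def solutionLoop : Nat → List Int → List Int → List Int
  | 0, _, arr => arr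
  | k+1, dq, arr =>
    match dq.getLast? with
    | none => arr
    | some a => solutionLoop k (a :: dq.dropLast) (arr ++ dq.dropLast.map (fun c => c + a))

def solution (numbers : List Int) : List Int :=
  PySem.List.sorted (PySem.Set.ofList (solutionLoop numbers.length numbers []))
    (fun x => x) false

-- ===== PORT B =====
-- itertools.combinations(numbers, 2): for each head x, pair it with every later element
def pairSums : List Int → List Int
  | [] => []
  | x :: xs => xs.map (fun y => x + y) ++ pairSums xs

def solution_alt (numbers : List Int) : List Int :=
  PySem.List.sorted (PySem.Set.ofList (pairSums numbers)) (fun x => x) false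

-- ===== PRECONDITION & SPEC =====
def Spec_solution (numbers : List Int) (out : List Int) : Prop := out = solution_alt numbers
instance (numbers : List Int) (out : List Int) : Decidable (Spec_solution numbers out) := by unfold Spec_solution; infer_instance

-- ===== CLAIM (what is proved, stated in full; the proofs are below) =====
def Claim_equal_solution : Prop := ∀ (numbers : List Int), Dom_solution numbers → Spec_solution numbers (solution numbers)

-- ===== LEMMAS AND PROOFS =====

-- membership in A's accumulated list: sums dq[i]+dq[j] with i among the last k positions
theorem mem_solutionLoop (k : Nat) (dq arr : List Int) (z : Int) (hk : k ≤ dq.length) :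
    z ∈ solutionLoop k dq arr ↔
      z ∈ arr ∨ ∃ i j, ∃ (hi : i < dq.length) (hj : j < dq.length),
        i ≠ j ∧ dq.length - k ≤ i ∧ dq[i] + dq[j] = z := by
  induction k generalizing dq arr with
  | zero =>
    simp only [solutionLoop]
    constructor
    · exact Or.inl
    · rintro (h | ⟨i, j, hi, hj, _, hge, _⟩)
      · exact h
      · omega
  | succ k ih =>
    rcases List.eq_nil_or_concat dq with rfl | ⟨rest, a, rfl⟩
    · simp at hk
    · simp only [List.concat_eq_append] at hk ⊢
      have hk' : k ≤ rest.length := by simp at hk; omega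
      simp only [solutionLoop, List.getLast?_concat, List.dropLast_concat]
      rw [ih (a :: rest) _ (by simpa using Nat.le_succ_of_le hk')]
      simp only [List.length_append, List.length_cons, List.length_nil]
      constructor
      · rintro (h | ⟨i, j, hi, hj, hne, hge, hsum⟩)
        · rw [List.mem_append] at h
          rcases h with h | h
          · exact Or.inl h
          · -- z = rest[j] + a: realize as pair (rest.length, j)
            rw [List.mem_map] at h
            obtain ⟨c, hc, rfl⟩ := h
            obtain ⟨j, hj, rfl⟩ := List.mem_iff_getElem.mp hc
            refine Or.inr ⟨rest.length, j, by omega, by omega, by omega, by omega, ?_⟩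
            rw [List.getElem_concat_length rfl (by simp), List.getElem_append_left hj]
            ring
        · -- a pair inside a :: rest; i ≥ rest.length + 1 - k ≥ 1
          obtain ⟨i, rfl⟩ : ∃ i', i = i' + 1 := ⟨i - 1, by omega⟩
          rcases Nat.eq_zero_or_pos j with rfl | hjpos
          · refine Or.inr ⟨i, rest.length, by omega, by omega, by omega, by omega, ?_⟩
            rw [List.getElem_concat_length rfl (by simp), List.getElem_append_left (by omega)]
            simpa using hsum
          · obtain ⟨j, rfl⟩ : ∃ j', j = j' + 1 := ⟨j - 1, by omega⟩
            refine Or.inr ⟨i, j, by omega, by omega, by omega, by omega, ?_⟩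
            rw [List.getElem_append_left (by omega), List.getElem_append_left (by omega)]
            simpa using hsum
      · rintro (h | ⟨i, j, hi, hj, hne, hge, hsum⟩)
        · exact Or.inl (List.mem_append.mpr (Or.inl h))
        · rcases Nat.lt_or_ge i rest.length with hi' | hi'
          · rcases Nat.lt_or_ge j rest.length with hj' | hj'
            · -- both inside rest: shift to (i+1, j+1) in a :: rest
              refine Or.inr ⟨i + 1, j + 1, by omega, by omega, by omega, by omega, ?_⟩
              rw [List.getElem_append_left hi', List.getElem_append_left hj'] at hsum
              simpa using hsum
            · -- j = rest.length: z = rest[i] + a, already in arr's appended map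
              have hj'' : j = rest.length := by omega
              subst hj''
              rw [List.getElem_append_left hi', List.getElem_concat_length rfl (by simp)] at hsum
              exact Or.inl (List.mem_append.mpr (Or.inr (List.mem_map.mpr
                ⟨rest[i], List.getElem_mem _, hsum⟩)))
          · -- i = rest.length: popped element a summed with rest[j]
            have hi'' : i = rest.length := by omega
            subst hi''
            have hj' : j < rest.length := by omega
            rw [List.getElem_concat_length rfl (by simp), List.getElem_append_left hj'] at hsum
            refine Or.inl (List.mem_append.mpr (Or.inr (List.mem_map.mpr
              ⟨rest[j], List.getElem_mem _, ?_⟩)))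
            rw [← hsum]; ring

-- membership in B's pair list: sums l[i]+l[j] with i < j
theorem mem_pairSums (l : List Int) (z : Int) :
    z ∈ pairSums l ↔
      ∃ i j, ∃ (hi : i < l.length) (hj : j < l.length), i < j ∧ l[i] + l[j] = z := by
  induction l with
  | nil => simp [pairSums]
  | cons x xs ih =>
    simp only [pairSums, List.mem_append, ih]
    constructor
    · rintro (h | ⟨i, j, hi, hj, hij, hsum⟩)
      · rw [List.mem_map] at h
        obtain ⟨c, hc, rfl⟩ := h
        obtain ⟨j, hj, rfl⟩ := List.mem_iff_getElem.mp hc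
        exact ⟨0, j + 1, by simp, by simp only [List.length_cons]; omega, by omega, by simp⟩
      · exact ⟨i + 1, j + 1, by simp only [List.length_cons]; omega,
          by simp only [List.length_cons]; omega, by omega, by simpa using hsum⟩
    · rintro ⟨i, j, hi, hj, hij, hsum⟩
      simp only [List.length_cons] at hi hj
      rcases Nat.eq_zero_or_pos i with rfl | hipos
      · obtain ⟨j, rfl⟩ : ∃ j', j = j' + 1 := ⟨j - 1, by omega⟩
        have hj' : j < xs.length := by omega
        refine Or.inl (List.mem_map.mpr ⟨xs[j], List.getElem_mem _, ?_⟩)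
        simpa using hsum
      · obtain ⟨i, rfl⟩ : ∃ i', i = i' + 1 := ⟨i - 1, by omega⟩
        obtain ⟨j, rfl⟩ : ∃ j', j = j' + 1 := ⟨j - 1, by omega⟩
        exact Or.inr ⟨i, j, by omega, by omega, by omega, by simpa using hsum⟩

theorem mem_loop_iff_pairSums (numbers : List Int) (z : Int) :
    z ∈ solutionLoop numbers.length numbers [] ↔ z ∈ pairSums numbers := by
  rw [mem_solutionLoop _ _ _ _ le_rfl, mem_pairSums]
  simp only [List.not_mem_nil, false_or, Nat.sub_self, Nat.zero_le, true_and]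
  constructor
  · rintro ⟨i, j, hi, hj, hne, hsum⟩
    rcases Nat.lt_or_ge i j with hij | hij
    · exact ⟨i, j, hi, hj, hij, hsum⟩
    · exact ⟨j, i, hj, hi, by omega, by rw [← hsum]; ring⟩
  · rintro ⟨i, j, hi, hj, hij, hsum⟩
    exact ⟨i, j, hi, hj, by omega, hsum⟩

-- ===== VERDICT (by name: the statement is the Claim_ definition above) =====
theorem solution_spec : Claim_equal_solution := by
  intro numbers _
  unfold Spec_solution solution solution_alt
  have hperm : List.Perm (PySem.Set.ofList (solutionLoop numbers.length numbers []))
      (PySem.Set.ofList (pairSums numbers)) := by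
    rw [List.perm_ext_iff_of_nodup (PySem.Set.nodup_ofList _) (PySem.Set.nodup_ofList _)]
    intro z
    rw [PySem.Set.mem_ofList, PySem.Set.mem_ofList]
    exact mem_loop_iff_pairSums numbers z
  exact PySem.List.sorted_eq_sorted_of_perm _ _ _ Function.injective_id hperm
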